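-- pv_equiv track=rewrite | github.com/facebookarchive/ds2 | Support/Scripts/test-protocol-latency.py | escape_binary
-- ===== SOURCE A (Python) =====
-- def escape_binary(message):
--     """
--     Escape the binary message using the process described in the GDB server
--     protocol documentation.
--
--     Most bytes are sent through as-is, but $, #, and { are escaped by writing
--     a { followed by the original byte mod 0x20.
--     """
--     out = ""
--     for c in message:
--         d = ord(c)
--         if d in (0x23, 0x24, 0x7d):
--             out += chr(0x7d)
--             out += chr(d ^ 0x20)
--         else:
--             out += c
--     return out
-- ===== SOURCE B (Python) =====
-- def escape_binary(message):
--     # Staged whole-string replacements: '}' must be escaped first; the later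
--     # stages' replacements introduce no '#' or '$', so no double escaping.
--     message = message.replace(chr(0x7d), chr(0x7d) + chr(0x7d ^ 0x20))
--     message = message.replace(chr(0x23), chr(0x7d) + chr(0x23 ^ 0x20))
--     return message.replace(chr(0x24), chr(0x7d) + chr(0x24 ^ 0x20))
-- ===== Notes on version B (the rewrite author's own statement) =====
-- stated objective: faster
-- what changed: Replaced A's single per-character loop with membership test and incremental concatenation by three staged whole-string replace passes ('}' escaped first so later stages cannot double-escape).
import Mathlib
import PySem

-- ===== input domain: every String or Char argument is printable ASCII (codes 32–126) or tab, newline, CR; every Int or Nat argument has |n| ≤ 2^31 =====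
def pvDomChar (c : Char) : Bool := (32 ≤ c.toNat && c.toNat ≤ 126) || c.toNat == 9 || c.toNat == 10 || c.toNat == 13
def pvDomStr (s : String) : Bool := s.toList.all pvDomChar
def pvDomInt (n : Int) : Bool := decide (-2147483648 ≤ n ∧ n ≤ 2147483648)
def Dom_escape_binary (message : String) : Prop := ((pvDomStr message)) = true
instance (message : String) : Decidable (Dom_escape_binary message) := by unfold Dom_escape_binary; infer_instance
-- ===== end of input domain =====

-- B replaces A's per-character escaping loop by three staged whole-string replace passes (return value only).
-- ===== PORT A =====
def escape_binary (message : String) : String :=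
  String.ofList (message.toList.foldl (fun out c =>
    let d := c.toNat
    if d = 0x23 ∨ d = 0x24 ∨ d = 0x7d then
      out ++ [Char.ofNat 0x7d] ++ [Char.ofNat (d ^^^ 0x20)]
    else
      out ++ [c]) [])

-- ===== PORT B =====
-- three staged str.replace passes; '}' escaped first so later stages cannot double-escape
def escape_binary_alt (message : String) : String :=
  let m1 := PySem.Str.replace message (String.ofList [Char.ofNat 0x7d]) (String.ofList [Char.ofNat 0x7d, Char.ofNat (0x7d ^^^ 0x20)])
  let m2 := PySem.Str.replace m1 (String.ofList [Char.ofNat 0x23]) (String.ofList [Char.ofNat 0x7d, Char.ofNat (0x23 ^^^ 0x20)])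
  PySem.Str.replace m2 (String.ofList [Char.ofNat 0x24]) (String.ofList [Char.ofNat 0x7d, Char.ofNat (0x24 ^^^ 0x20)])

-- ===== PRECONDITION & SPEC =====
def Spec_escape_binary (message : String) (out : String) : Prop := out = escape_binary_alt message
instance (message : String) (out : String) : Decidable (Spec_escape_binary message out) := by unfold Spec_escape_binary; infer_instance

-- ===== CLAIM (what is proved, stated in full; the proofs are below) =====
def Claim_equal_escape_binary : Prop := ∀ (message : String), Dom_escape_binary message → Spec_escape_binary message (escape_binary message)

-- ===== LEMMAS AND PROOFS =====

-- single-character replace is a flatMap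
theorem replace_go_single (o : Char) (r : List Char) :
    ∀ (l : List Char) (fuel : Nat) (acc : List Char), l.length ≤ fuel →
      PySem.Chars.replace.go [o] r fuel l acc
        = acc.reverse ++ l.flatMap (fun c => if c = o then r else [c]) := by
  intro l
  induction l with
  | nil =>
    intro fuel acc _
    cases fuel <;> simp [PySem.Chars.replace.go]
  | cons c t ih =>
    intro fuel acc hle
    cases fuel with
    | zero => simp at hle
    | succ f =>
      have ht : t.length ≤ f := by simpa using hle
      by_cases h : c = o
      · have hp : List.isPrefixOf [o] (c :: t) = true := by
          simp [List.isPrefixOf, h]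
        simp only [PySem.Chars.replace.go, hp]
        rw [show List.drop (List.length [o]) (c :: t) = t from by simp]
        rw [ih f (r.reverse ++ acc) ht]
        simp [h]
      · have hp : List.isPrefixOf [o] (c :: t) = false := by
          simp [List.isPrefixOf]
          exact fun he => absurd he.symm h
        simp only [PySem.Chars.replace.go, hp, Bool.false_eq_true, if_false]
        rw [ih f (c :: acc) ht]
        simp [h]

theorem replace_single (s : List Char) (o : Char) (r : List Char) :
    PySem.Chars.replace s [o] r = s.flatMap (fun c => if c = o then r else [c]) := by
  unfold PySem.Chars.replace
  simp [replace_go_single o r s s.length [] (le_refl _)]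

-- the composition of the three per-char substitutions equals A's branch
theorem stages_pointwise (c : Char) :
    ((if c = Char.ofNat 0x7d then [Char.ofNat 0x7d, Char.ofNat (0x7d ^^^ 0x20)] else [c]).flatMap
        (fun x => (if x = Char.ofNat 0x23 then [Char.ofNat 0x7d, Char.ofNat (0x23 ^^^ 0x20)] else [x]).flatMap
          (fun y => if y = Char.ofNat 0x24 then [Char.ofNat 0x7d, Char.ofNat (0x24 ^^^ 0x20)] else [y])))
      = (if c.toNat = 0x23 ∨ c.toNat = 0x24 ∨ c.toNat = 0x7d then
          [Char.ofNat 0x7d] ++ [Char.ofNat (c.toNat ^^^ 0x20)] else [c]) := by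
  by_cases h7d : c = Char.ofNat 0x7d
  · subst h7d; decide
  · by_cases h23 : c = Char.ofNat 0x23
    · subst h23; decide
    · by_cases h24 : c = Char.ofNat 0x24
      · subst h24; decide
      · have hn : ¬ (c.toNat = 0x23 ∨ c.toNat = 0x24 ∨ c.toNat = 0x7d) := by
          rintro (h | h | h)
          · exact h23 (by rw [← Char.ofNat_toNat c, h])
          · exact h24 (by rw [← Char.ofNat_toNat c, h])
          · exact h7d (by rw [← Char.ofNat_toNat c, h])
        simp [h7d, h23, h24, hn]

-- ===== VERDICT (by name: the statement is the Claim_ definition above) =====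
theorem escape_binary_spec : Claim_equal_escape_binary := by
  intro message _
  unfold Spec_escape_binary escape_binary escape_binary_alt
  have heq : (fun (out : List Char) (c : Char) =>
      if c.toNat = 0x23 ∨ c.toNat = 0x24 ∨ c.toNat = 0x7d then
        out ++ [Char.ofNat 0x7d] ++ [Char.ofNat (c.toNat ^^^ 0x20)]
      else out ++ [c])
      = fun out c => out ++ (if c.toNat = 0x23 ∨ c.toNat = 0x24 ∨ c.toNat = 0x7d then
          [Char.ofNat 0x7d] ++ [Char.ofNat (c.toNat ^^^ 0x20)] else [c]) := by
    funext out c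
    by_cases h : c.toNat = 0x23 ∨ c.toNat = 0x24 ∨ c.toNat = 0x7d <;> simp [h]
  simp only [heq, PySem.List.foldl_append_eq_flatMap, List.nil_append]
  simp only [PySem.Str.replace, String.toList_ofList]
  rw [replace_single, replace_single, replace_single]
  simp only [List.flatMap_assoc]
  exact congrArg String.ofList (List.flatMap_congr (fun c _ => (stages_pointwise c).symm))
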